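-- pv_equiv track=rewrite | github.com/rvdweerd/AOC2023 | main.py | code_lookup
-- ===== SOURCE A (Python) =====
-- def code_lookup(value, ranges):
--     left, right = 0, len(ranges)
--
--     while left != right - 1:
--         mid = left + (right - left) // 2
--
--         if value <= ranges[mid - 1][1]:  # Check left split max
--             right = mid
--         elif value >= ranges[mid][0]:    # Check right split min
--             left = mid
--         else:                            # We are in a gap
--             return 0
--
--     if ranges[left][0] <= value <= ranges[left][1]:
--         # Return the code
--         return ranges[left][2]
--     else:
--         return 0
-- ===== SOURCE B (Python) =====
-- def code_lookup(value, ranges):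
--     # recursive divide-and-conquer on list slices instead of an index-pair loop
--     if len(ranges) != 1:
--         m = len(ranges) // 2
--         if value <= ranges[m - 1][1]:
--             return code_lookup(value, ranges[:m])
--         if value >= ranges[m][0]:
--             return code_lookup(value, ranges[m:])
--         return 0
--     low, high, code = ranges[0]
--     return code if low <= value <= high else 0
-- ===== Notes on version B (the rewrite author's own statement) =====
-- stated objective: alternative
-- what changed: A's index-pair while-loop (left/right/mid bookkeeping over the whole list) is replaced by a self-recursive divide-and-conquer that carries the current sublist itself, slicing it in half at each step; A's value on arbitrary (also unsorted) input is its observable behaviour and any exactly-equivalent search must follow the same comparison tree, so the restructure is iterative-to-recursive with slices rather than a new algorithm.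
import Mathlib
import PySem

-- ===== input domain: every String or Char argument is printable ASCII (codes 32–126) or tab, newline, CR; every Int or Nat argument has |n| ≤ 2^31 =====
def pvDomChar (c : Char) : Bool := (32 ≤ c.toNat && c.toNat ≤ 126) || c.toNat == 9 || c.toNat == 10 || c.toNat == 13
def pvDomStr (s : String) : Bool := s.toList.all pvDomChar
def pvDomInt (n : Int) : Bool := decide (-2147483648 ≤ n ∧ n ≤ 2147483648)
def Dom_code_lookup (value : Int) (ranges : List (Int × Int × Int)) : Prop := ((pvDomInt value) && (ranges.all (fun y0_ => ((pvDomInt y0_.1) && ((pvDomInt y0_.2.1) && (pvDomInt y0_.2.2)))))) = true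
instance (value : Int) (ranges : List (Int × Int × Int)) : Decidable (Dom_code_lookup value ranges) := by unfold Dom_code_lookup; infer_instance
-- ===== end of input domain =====

-- B restructures A's index-pair while-loop into a self-recursive divide-and-conquer on list
-- slices (same comparison tree, different decomposition and data handling).

-- ===== PORT A =====
-- A's while-loop, transliterated with a fuel counter that only makes it total
-- (the interval shrinks every iteration, so fuel = len+1 is never exhausted when left=0,
-- right=len); pyGet? = none is Python's IndexError, excluded by Pre_.
def codeLoopA (value : Int) (ranges : List (Int × Int × Int)) :
    Nat → Int → Int → Int
  | 0, _, _ => 0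
  | fuel + 1, left, right =>
    if left ≠ right - 1 then
      let mid := left + PySem.Int.floordiv (right - left) 2
      match PySem.List.pyGet? ranges (mid - 1) with
      | none => 0            -- IndexError (outside Pre_)
      | some rm1 =>
        if value ≤ rm1.2.1 then codeLoopA value ranges fuel left mid
        else
          match PySem.List.pyGet? ranges mid with
          | none => 0        -- IndexError (outside Pre_)
          | some rm =>
            if rm.1 ≤ value then codeLoopA value ranges fuel mid right
            else 0           -- gap
    else
      match PySem.List.pyGet? ranges left with
      | none => 0            -- IndexError (outside Pre_)
      | some r => if r.1 ≤ value ∧ value ≤ r.2.1 then r.2.2 else 0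

def code_lookup (value : Int) (ranges : List (Int × Int × Int)) : Int :=
  codeLoopA value ranges (ranges.length + 1) 0 (ranges.length : Int)

-- ===== PORT B =====
-- Source B's recursion on the sliced sublist; pyGet? = none is Python's IndexError on the
-- empty list (outside Pre_); slices ranges[:m] / ranges[m:] are PySem.List.slice.
def code_lookup_alt (value : Int) (ranges : List (Int × Int × Int)) : Int :=
  if hne : ranges.length ≠ 1 then
    let m : Nat := ranges.length / 2
    match h2 : PySem.List.pyGet? ranges ((m : Int) - 1) with
    | none => 0              -- IndexError on the empty list (outside Pre_)
    | some rm1 =>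
      if value ≤ rm1.2.1 then
        code_lookup_alt value (PySem.List.slice ranges none (some (m : Int)))
      else
        match PySem.List.pyGet? ranges (m : Int) with
        | none => 0
        | some rm =>
          if rm.1 ≤ value then
            code_lookup_alt value (PySem.List.slice ranges (some (m : Int)) none)
          else 0
  else
    match PySem.List.pyGet? ranges 0 with
    | none => 0
    | some r => if r.1 ≤ value ∧ value ≤ r.2.1 then r.2.2 else 0
termination_by ranges.length
decreasing_by
  · have hin : ¬ PySem.List.pyGet? ranges ((m : Int) - 1) = none := by
      rw [h2]; simp
    rw [PySem.List.pyGet?_eq_none_iff] at hin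
    rw [not_not] at hin
    unfold PySem.Raise.InRange at hin
    rw [PySem.List.slice_to ranges (by positivity)]
    simp only [List.length_take]
    omega
  · have hin : ¬ PySem.List.pyGet? ranges ((m : Int) - 1) = none := by
      rw [h2]; simp
    rw [PySem.List.pyGet?_eq_none_iff] at hin
    rw [not_not] at hin
    unfold PySem.Raise.InRange at hin
    rw [PySem.List.slice_from ranges (by positivity)]
    simp only [List.length_drop]
    omega

-- ===== PRECONDITION & SPEC =====
-- Pre_ excludes only the empty list, on which both programs raise IndexError.
def Pre_code_lookup (value : Int) (ranges : List (Int × Int × Int)) : Prop :=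
  ranges ≠ []
instance (value : Int) (ranges : List (Int × Int × Int)) : Decidable (Pre_code_lookup value ranges) := by unfold Pre_code_lookup; infer_instance

def pvWitness_code_lookup : Int × (List (Int × Int × Int)) :=
  (7, [(0, 4, 11), (6, 9, 22), (15, 20, 33)])

def Spec_code_lookup (value : Int) (ranges : List (Int × Int × Int)) (out : Int) : Prop := out = code_lookup_alt value ranges
instance (value : Int) (ranges : List (Int × Int × Int)) (out : Int) : Decidable (Spec_code_lookup value ranges out) := by unfold Spec_code_lookup; infer_instance

-- ===== CLAIM (what is proved, stated in full; the proofs are below) =====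
def Claim_equal_code_lookup : Prop := ∀ (value : Int) (ranges : List (Int × Int × Int)), Dom_code_lookup value ranges → Pre_code_lookup value ranges → Spec_code_lookup value ranges (code_lookup value ranges)

-- ===== LEMMAS AND PROOFS =====

-- A's loop on the index interval [left, right) computes B's recursion on the sublist
-- ranges[left:right] (as take/drop), for any nonempty interval inside the list.
theorem codeLoopA_eq_alt (value : Int) (ranges : List (Int × Int × Int)) :
    ∀ (fuel : Nat) (left right : Int),
      0 ≤ left → left < right → right ≤ (ranges.length : Int) →
      (right - left).toNat ≤ fuel →
      codeLoopA value ranges fuel left right =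
        code_lookup_alt value ((ranges.drop left.toNat).take (right - left).toNat) := by
  intro fuel
  induction fuel with
  | zero => intro left right h0 hlr hrn hfuel; omega
  | succ fuel ih =>
    intro left right h0 hlr hrn hfuel
    set l := left.toNat with hl
    set k := (right - left).toNat with hk
    set seg := (ranges.drop l).take k with hseg
    have hlen : seg.length = k := by
      simp only [hseg, List.length_take, List.length_drop]
      omega
    have hget : ∀ (i : Nat) (hi : i < k),
        seg[i]'(by omega) = ranges[l + i]'(by omega) := by
      intro i hi
      simp only [hseg, List.getElem_take, List.getElem_drop]
    rw [codeLoopA, code_lookup_alt]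
    by_cases hcond : left ≠ right - 1
    · have hk2 : 2 ≤ k := by omega
      rw [if_pos hcond, dif_pos (by omega : ¬ seg.length = 1)]
      have hfd : PySem.Int.floordiv (right - left) 2 = ((k / 2 : Nat) : Int) := by
        have : right - left = ((k : Nat) : Int) := by omega
        rw [this]
        exact_mod_cast PySem.Int.floordiv_natCast k 2
      set m : Nat := k / 2 with hm
      have hm1 : 1 ≤ m := by omega
      have hm2 : m < k := by omega
      have hmid : left + PySem.Int.floordiv (right - left) 2 = ((l + m : Nat) : Int) := by
        rw [hfd]; omega
      rw [hmid]
      have hmseg : seg.length / 2 = m := by rw [hlen]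
      rw [hmseg]
      -- probe at mid - 1 on both sides
      have hpa : PySem.List.pyGet? ranges (((l + m : Nat) : Int) - 1) =
          some (ranges[l + (m - 1)]'(by omega)) := by
        rw [show (((l + m : Nat) : Int) - 1) = ((l + (m - 1) : Nat) : Int) by omega]
        rw [PySem.List.pyGet?_natCast, List.getElem?_eq_getElem (by omega)]
      have hpb : PySem.List.pyGet? seg (((m : Nat) : Int) - 1) =
          some (ranges[l + (m - 1)]'(by omega)) := by
        rw [show (((m : Nat) : Int) - 1) = ((m - 1 : Nat) : Int) by omega]
        rw [PySem.List.pyGet?_natCast, List.getElem?_eq_getElem (by omega)]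
        rw [hget (m - 1) (by omega)]
      dsimp only
      rw [hpa, hpb]
      dsimp only
      by_cases hle : value ≤ (ranges[l + (m - 1)]'(by omega)).2.1
      · rw [if_pos hle, if_pos hle]
        -- left half: ranges[left:mid] = take m seg
        rw [PySem.List.slice_to seg (by positivity)]
        have hslice : List.take ((m : Int)).toNat seg = (ranges.drop l).take m := by
          simp only [hseg, List.take_take, Int.toNat_natCast]
          congr 1
          omega
        rw [hslice]
        have := ih left ((l + m : Nat) : Int) h0 (by omega) (by omega) (by omega)
        rw [this]
        congr 2
        omega
      · rw [if_neg hle, if_neg hle]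
        -- probe at mid on both sides
        have hpa2 : PySem.List.pyGet? ranges ((l + m : Nat) : Int) =
            some (ranges[l + m]'(by omega)) := by
          rw [PySem.List.pyGet?_natCast, List.getElem?_eq_getElem (by omega)]
        have hpb2 : PySem.List.pyGet? seg ((m : Nat) : Int) =
            some (ranges[l + m]'(by omega)) := by
          rw [PySem.List.pyGet?_natCast, List.getElem?_eq_getElem (by omega)]
          rw [hget m (by omega)]
        rw [hpa2, hpb2]
        dsimp only
        by_cases hge : (ranges[l + m]'(by omega)).1 ≤ value
        · rw [if_pos hge, if_pos hge]
          -- right half: ranges[mid:right] = drop m seg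
          rw [PySem.List.slice_from seg (by positivity)]
          have hslice : List.drop ((m : Int)).toNat seg = (ranges.drop (l + m)).take (k - m) := by
            simp only [hseg, Int.toNat_natCast, List.drop_take, List.drop_drop]

          rw [hslice]
          have := ih ((l + m : Nat) : Int) right (by omega) (by omega) hrn (by omega)
          rw [this]
          congr 2
          omega
        · rw [if_neg hge, if_neg hge]
    · rw [if_neg hcond, dif_neg (by omega : ¬ ¬ seg.length = 1)]
      have hk1 : k = 1 := by omega
      have hpa : PySem.List.pyGet? ranges left = some (ranges[left.toNat]'(by omega)) :=
        PySem.List.pyGet?_eq_some_getElem ranges h0 (by omega)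
      have hpb : PySem.List.pyGet? seg 0 = some (ranges[l]'(by omega)) := by
        rw [show (0 : Int) = ((0 : Nat) : Int) by norm_num]
        rw [PySem.List.pyGet?_natCast, List.getElem?_eq_getElem (by omega)]
        have := hget 0 (by omega)
        simpa using this
      rw [hpa, hpb]

-- ===== VERDICT (by name: the statement is the Claim_ definition above) =====
theorem code_lookup_spec : Claim_equal_code_lookup := by
  intro value ranges _ hpre
  unfold Spec_code_lookup code_lookup
  have hn : 0 < ranges.length := List.length_pos_iff.2 hpre
  have := codeLoopA_eq_alt value ranges (ranges.length + 1) 0 (ranges.length : Int)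
    (by omega) (by exact_mod_cast hn) (le_refl _) (by omega)
  rw [this]
  congr 1
  simp
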